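-- pv_equiv track=rewrite | github.com/WeilouChi/sgmodel | Documents/research/SG-model/preprocessData.py | sort_structure
-- ===== SOURCE A (Python) =====
-- def sort_structure(structure):
--     '''to do: 把相同的原子排在一起'''
--     result = []
--     spec_id = ['C', 'O', 'N', 'H']
--     for Id in spec_id:
--         for i in structure:
--             if i[0] == Id:
--                 result.append(i)
--     return result
-- ===== SOURCE B (Python) =====
-- def sort_structure(structure):
--     buckets = {'C': [], 'O': [], 'N': [], 'H': []}
--     for i in structure:
--         if i[0] in buckets:
--             buckets[i[0]].append(i)
--     return buckets['C'] + buckets['O'] + buckets['N'] + buckets['H']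
-- ===== Notes on version B (the rewrite author's own statement) =====
-- stated objective: idiomatic
-- what changed: Single pass that appends each atom into one of four species buckets, concatenated at the end, instead of rescanning the whole structure once per species.
import Mathlib
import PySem

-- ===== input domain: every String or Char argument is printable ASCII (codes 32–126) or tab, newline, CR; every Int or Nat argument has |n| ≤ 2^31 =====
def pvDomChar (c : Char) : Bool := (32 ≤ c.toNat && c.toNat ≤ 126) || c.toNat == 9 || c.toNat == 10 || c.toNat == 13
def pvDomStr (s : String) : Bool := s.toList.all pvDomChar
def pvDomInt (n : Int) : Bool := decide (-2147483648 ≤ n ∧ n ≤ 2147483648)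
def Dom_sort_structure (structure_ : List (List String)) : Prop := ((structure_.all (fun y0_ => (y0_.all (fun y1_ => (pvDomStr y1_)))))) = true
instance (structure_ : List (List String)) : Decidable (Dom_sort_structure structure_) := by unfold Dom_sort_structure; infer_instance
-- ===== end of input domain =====

-- B replaces A's four rescans of the structure with one bucketing pass; objective: idiomatic.


-- ===== PORT A =====
-- i[0] is PySem.List.pyGet? i 0; under Pre_ every inner list is nonempty, so it is (i.headD "")
def sort_structure (structure_ : List (List String)) : List (List String) :=
  ["C", "O", "N", "H"].foldl
    (fun result Id =>
      structure_.foldl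
        (fun result i => if (PySem.List.pyGet? i 0).getD "" == Id then result ++ [i] else result)
        result)
    []

-- ===== PORT B =====
-- buckets is a fixed-key dict { 'C','O','N','H' }, transcribed as a 4-tuple of lists
def sort_structure_alt (structure_ : List (List String)) : List (List String) :=
  let b :=
    structure_.foldl
      (fun (b : List (List String) × List (List String) × List (List String) × List (List String)) i =>
        let k := (PySem.List.pyGet? i 0).getD ""
        if k == "C" then (b.1 ++ [i], b.2.1, b.2.2.1, b.2.2.2)
        else if k == "O" then (b.1, b.2.1 ++ [i], b.2.2.1, b.2.2.2)
        else if k == "N" then (b.1, b.2.1, b.2.2.1 ++ [i], b.2.2.2)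
        else if k == "H" then (b.1, b.2.1, b.2.2.1, b.2.2.2 ++ [i])
        else b)
      ([], [], [], [])
  b.1 ++ b.2.1 ++ b.2.2.1 ++ b.2.2.2

-- ===== PRECONDITION & SPEC =====
-- Pre_ excludes structures containing an empty inner list, on which both A and B raise IndexError at i[0].
def Pre_sort_structure (structure_ : List (List String)) : Prop :=
  ∀ i ∈ structure_, i ≠ []
instance (structure_ : List (List String)) : Decidable (Pre_sort_structure structure_) := by
  unfold Pre_sort_structure; infer_instance

def pvWitness_sort_structure : List (List String) := [["H", "1"], ["C", "2"], ["X", "3"], ["O", "4"]]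

def Spec_sort_structure (structure_ : List (List String)) (out : List (List String)) : Prop := out = sort_structure_alt structure_
instance (structure_ : List (List String)) (out : List (List String)) : Decidable (Spec_sort_structure structure_ out) := by unfold Spec_sort_structure; infer_instance

-- ===== CLAIM (what is proved, stated in full; the proofs are below) =====
def Claim_equal_sort_structure : Prop := ∀ (structure_ : List (List String)), Dom_sort_structure structure_ → Pre_sort_structure structure_ → Spec_sort_structure structure_ (sort_structure structure_)

-- ===== LEMMAS AND PROOFS =====

def pvKey (i : List String) : String := (PySem.List.pyGet? i 0).getD ""

-- A's inner loop collects the atoms whose key is Id, appended to the accumulator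
theorem pvA_inner (Id : String) (s : List (List String)) (acc : List (List String)) :
    s.foldl (fun result i => if (PySem.List.pyGet? i 0).getD "" == Id then result ++ [i] else result) acc
      = acc ++ s.filter (fun i => pvKey i == Id) := by
  induction s generalizing acc with
  | nil => simp
  | cons x xs ih =>
    simp only [List.foldl_cons, List.filter_cons, pvKey]
    by_cases h : ((PySem.List.pyGet? x 0).getD "" == Id) = true
    · simp only [h, if_true]; rw [ih]; simp_all [pvKey]
    · simp only [h, if_false, Bool.false_eq_true]; rw [ih]; simp_all [pvKey]

-- B's fold fills the four buckets with the corresponding filters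
theorem pvB_loop (s : List (List String))
    (c o n h : List (List String)) :
    s.foldl
      (fun (b : List (List String) × List (List String) × List (List String) × List (List String)) i =>
        let k := (PySem.List.pyGet? i 0).getD ""
        if k == "C" then (b.1 ++ [i], b.2.1, b.2.2.1, b.2.2.2)
        else if k == "O" then (b.1, b.2.1 ++ [i], b.2.2.1, b.2.2.2)
        else if k == "N" then (b.1, b.2.1, b.2.2.1 ++ [i], b.2.2.2)
        else if k == "H" then (b.1, b.2.1, b.2.2.1, b.2.2.2 ++ [i])
        else b)
      (c, o, n, h)
      = (c ++ s.filter (fun i => pvKey i == "C"),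
         o ++ s.filter (fun i => pvKey i == "O"),
         n ++ s.filter (fun i => pvKey i == "N"),
         h ++ s.filter (fun i => pvKey i == "H")) := by
  induction s generalizing c o n h with
  | nil => simp
  | cons x xs ih =>
    simp only [List.foldl_cons, List.filter_cons, pvKey]
    by_cases hc : ((PySem.List.pyGet? x 0).getD "" == "C") = true
    · simp only [hc, if_true]; rw [ih]; simp_all [pvKey]
    · by_cases ho : ((PySem.List.pyGet? x 0).getD "" == "O") = true
      · simp only [hc, ho, if_true, if_false, Bool.false_eq_true]; rw [ih]; simp_all [pvKey]
      · by_cases hn : ((PySem.List.pyGet? x 0).getD "" == "N") = true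
        · simp only [hc, ho, hn, if_true, if_false, Bool.false_eq_true]; rw [ih]; simp_all [pvKey]
        · by_cases hh : ((PySem.List.pyGet? x 0).getD "" == "H") = true
          · simp only [hc, ho, hn, hh, if_true, if_false, Bool.false_eq_true]; rw [ih]; simp_all [pvKey]
          · simp only [hc, ho, hn, hh, if_false, Bool.false_eq_true]; rw [ih]; simp_all [pvKey]

-- ===== VERDICT (by name: the statement is the Claim_ definition above) =====
theorem sort_structure_spec : Claim_equal_sort_structure := by
  intro s _ _
  unfold Spec_sort_structure sort_structure sort_structure_alt
  simp only [List.foldl_cons, List.foldl_nil, pvA_inner, pvB_loop]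
  simp [List.append_assoc]
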